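-- pv_equiv track=rewrite | github.com/niktaakbarpour/Ruby_Reflexion | programming_runs/generators/py_generate.py | rb_is_syntax_valid
-- ===== SOURCE A (Python) =====
-- def rb_is_syntax_valid(code: str) -> bool:
--     """
--     A basic Ruby syntax checker implemented in pure Python.
--     This checks for basic syntax rules like matching keywords and brackets.
--     """
--     code = code.strip()
--
--     # Check for matching 'def' and 'end' keywords
--     def_count = 0
--     end_count = 0
--     in_string = False
--     string_char = None
--     brackets = []  # Stack for (), [], {}
--
--     lines = code.split('\n')
--     for line in lines:
--         line = line.strip()
--
--         # Skip comments
--         if line.startswith('#'):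
--             continue
--
--         for i, char in enumerate(line):
--             # Handle string literals
--             if char in ['"', "'"] and (i == 0 or line[i-1] != '\\'):
--                 if not in_string:
--                     in_string = True
--                     string_char = char
--                 elif char == string_char:
--                     in_string = False
--                     string_char = None
--                 continue
--
--             if in_string:
--                 continue
--
--             # Count keywords outside of strings
--             if line[i:].startswith('def '):
--                 def_count += 1
--             elif char == 'e' and line[i:].startswith('end') and (i+3 >= len(line) or not line[i+3].isalnum()):
--                 end_count += 1
--
--             # Check brackets
--             if char in '([{':
--                 brackets.append(char)
--             elif char in ')]}':
--                 if not brackets: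
--                     return False
--                 last_open = brackets.pop()
--                 if (char == ')' and last_open != '(' or
--                     char == ']' and last_open != '[' or
--                     char == '}' and last_open != '{'):
--                     return False
--
--     # Final checks
--     return (def_count == end_count and  # All 'def' have matching 'end'
--             not brackets and             # All brackets are closed
--             not in_string)               # No unclosed strings
-- ===== SOURCE B (Python) =====
-- def rb_is_syntax_valid(code: str) -> bool:
--     """Two-pass checker: pass 1 builds the list of 'active' positions
--     (outside strings/comments/quotes) while tracking the cross-line string
--     state; pass 2 does keyword counting and bracket matching on that list."""
--     code = code.strip()
--
--     # Pass 1: classify characters, collect active (line, index) pairs.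
--     in_string = False
--     string_char = None
--     active = []
--     for line in code.split('\n'):
--         line = line.strip()
--         if line.startswith('#'):
--             continue
--         for i, ch in enumerate(line):
--             if ch in '"\'' and (i == 0 or line[i - 1] != '\\'):
--                 if not in_string:
--                     in_string, string_char = True, ch
--                 elif ch == string_char:
--                     in_string, string_char = False, None
--             elif not in_string:
--                 active.append((line, i))
--
--     # Pass 2: keyword and bracket matching over the active positions only.
--     def_count = end_count = 0
--     brackets = []
--     pairs = {')': '(', ']': '[', '}': '{'}
--     for line, i in active:
--         ch = line[i]
--         if line[i:].startswith('def '):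
--             def_count += 1
--         elif ch == 'e' and line[i:].startswith('end') and (
--                 i + 3 >= len(line) or not line[i + 3].isalnum()):
--             end_count += 1
--         if ch in '([{':
--             brackets.append(ch)
--         elif ch in ')]}':
--             if not brackets or brackets.pop() != pairs[ch]:
--                 return False
--
--     return def_count == end_count and not brackets and not in_string
-- ===== Notes on version B (the rewrite author's own statement) =====
-- stated objective: alternative
-- what changed: A's single interleaved scan is split into a classification pass that tracks the cross-line string state and collects the active (line, index) positions, followed by a separate flat fold over those positions that does the keyword counting and bracket-stack matching.
import Mathlib
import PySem

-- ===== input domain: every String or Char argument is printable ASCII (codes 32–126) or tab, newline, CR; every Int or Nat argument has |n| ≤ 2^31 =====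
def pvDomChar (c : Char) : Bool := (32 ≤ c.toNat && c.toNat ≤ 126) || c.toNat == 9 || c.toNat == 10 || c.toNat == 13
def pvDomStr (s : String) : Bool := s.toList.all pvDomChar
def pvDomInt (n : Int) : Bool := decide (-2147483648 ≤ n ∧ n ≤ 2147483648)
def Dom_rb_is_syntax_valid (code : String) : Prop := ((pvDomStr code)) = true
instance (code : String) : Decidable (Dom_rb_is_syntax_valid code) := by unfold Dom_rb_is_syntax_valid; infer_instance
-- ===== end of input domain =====

-- B replaces A's single interleaved scan by a classification pass collecting the
-- 'active' positions, followed by a flat fold doing the keyword/bracket matching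
-- (objective: alternative decomposition, same cost).

-- ===== PORT A =====
-- A's inner per-line loop; state (def_count, end_count, in_string, string_char, brackets);
-- none = the Python 'return False'.  rest is line.drop i (the current loop position).
def pvALoop (line : List Char) (rest : List Char) (i : Nat)
    (d e : Int) (instr : Bool) (sc : Option Char) (br : List Char) :
    Option (Int × Int × Bool × Option Char × List Char) :=
  match rest with
  | [] => some (d, e, instr, sc, br)
  | c :: rs =>
    if (c == '"' || c == '\'') && (i == 0 || (line.getD (i-1) ' ' != '\\')) then
      if !instr then pvALoop line rs (i+1) d e true (some c) br
      else if some c == sc then pvALoop line rs (i+1) d e false none br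
      else pvALoop line rs (i+1) d e instr sc br
    else if instr then pvALoop line rs (i+1) d e instr sc br
    else
      let d' := if PySem.Chars.startswith (line.drop i) "def ".toList then d + 1 else d
      let e' := if !(PySem.Chars.startswith (line.drop i) "def ".toList) &&
                   (c == 'e' && PySem.Chars.startswith (line.drop i) "end".toList &&
                    (decide (line.length ≤ i+3) || !(PySem.Chars.isalnum (line.getD (i+3) ' '))))
                then e + 1 else e
      if c == '(' || c == '[' || c == '{' then
        pvALoop line rs (i+1) d' e' instr sc (c :: br)
      else if c == ')' || c == ']' || c == '}' then
        match br with
        | [] => none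
        | lastOpen :: brs =>
          if (c == ')' && lastOpen != '(') || (c == ']' && lastOpen != '[') ||
             (c == '}' && lastOpen != '{') then none
          else pvALoop line rs (i+1) d' e' instr sc brs
      else pvALoop line rs (i+1) d' e' instr sc br

-- A's outer loop over the lines
def pvALines (lines : List (List Char))
    (d e : Int) (instr : Bool) (sc : Option Char) (br : List Char) :
    Option (Int × Int × Bool × Option Char × List Char) :=
  match lines with
  | [] => some (d, e, instr, sc, br)
  | l :: ls =>
    let line := PySem.Chars.strip l
    if PySem.Chars.startswith line ['#'] then pvALines ls d e instr sc br
    else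
      match pvALoop line line 0 d e instr sc br with
      | none => none
      | some (d', e', instr', sc', br') => pvALines ls d' e' instr' sc' br'

def rb_is_syntax_valid (code : String) : Bool :=
  match pvALines (PySem.Chars.splitOn (PySem.Chars.strip code.toList) ['\n'])
      0 0 false none [] with
  | none => false
  | some (d, e, instr, _, br) => decide (d = e) && br.isEmpty && !instr

-- ===== PORT B =====
-- pass 1, per line: string-state tracking only; returns active indices and the new state
def pvClassify (line : List Char) (rest : List Char) (i : Nat)
    (instr : Bool) (sc : Option Char) : List Nat × Bool × Option Char :=
  match rest with
  | [] => ([], instr, sc)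
  | c :: rs =>
    if (c == '"' || c == '\'') && (i == 0 || (line.getD (i-1) ' ' != '\\')) then
      if !instr then pvClassify line rs (i+1) true (some c)
      else if some c == sc then pvClassify line rs (i+1) false none
      else pvClassify line rs (i+1) instr sc
    else if instr then pvClassify line rs (i+1) instr sc
    else
      match pvClassify line rs (i+1) instr sc with
      | (acts, instr', sc') => (i :: acts, instr', sc')

-- pass 1, all lines: the flat list of active (line, index) pairs and the final string state
def pvPass1 (lines : List (List Char)) (instr : Bool) (sc : Option Char) :
    List (List Char × Nat) × Bool × Option Char :=
  match lines with
  | [] => ([], instr, sc)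
  | l :: ls =>
    let line := PySem.Chars.strip l
    if PySem.Chars.startswith line ['#'] then pvPass1 ls instr sc
    else
      match pvClassify line line 0 instr sc with
      | (acts, instr', sc') =>
        match pvPass1 ls instr' sc' with
        | (rest, fin) => (acts.map (fun i => (line, i)) ++ rest, fin)

-- the matching opener for a closing bracket (Source B's `pairs` dict)
def pvPairs (c : Char) : Char :=
  if c == ')' then '(' else if c == ']' then '[' else '{'

-- pass 2, one active position: keyword counting and bracket matching
def pvStep (st : Int × Int × List Char) (p : List Char × Nat) :
    Option (Int × Int × List Char) :=
  let c := p.1.getD p.2 ' '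
  let sfx := p.1.drop p.2
  let d' := if PySem.Chars.startswith sfx "def ".toList then st.1 + 1 else st.1
  let e' := if !(PySem.Chars.startswith sfx "def ".toList) &&
               (c == 'e' && PySem.Chars.startswith sfx "end".toList &&
                (decide (p.1.length ≤ p.2+3) || !(PySem.Chars.isalnum (p.1.getD (p.2+3) ' '))))
            then st.2.1 + 1 else st.2.1
  if c == '(' || c == '[' || c == '{' then some (d', e', c :: st.2.2)
  else if c == ')' || c == ']' || c == '}' then
    match st.2.2 with
    | [] => none
    | top :: brs => if top != pvPairs c then none else some (d', e', brs)
  else some (d', e', st.2.2)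

def rb_is_syntax_valid_alt (code : String) : Bool :=
  match pvPass1 (PySem.Chars.splitOn (PySem.Chars.strip code.toList) ['\n']) false none with
  | (acts, instr, _) =>
    match acts.foldl (fun o p => o.bind fun s => pvStep s p) (some (0, 0, [])) with
    | none => false
    | some (d, e, br) => decide (d = e) && br.isEmpty && !instr

-- ===== PRECONDITION & SPEC =====
def Spec_rb_is_syntax_valid (code : String) (out : Bool) : Prop := out = rb_is_syntax_valid_alt code
instance (code : String) (out : Bool) : Decidable (Spec_rb_is_syntax_valid code out) := by unfold Spec_rb_is_syntax_valid; infer_instance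

-- ===== CLAIM (what is proved, stated in full; the proofs are below) =====
def Claim_equal_rb_is_syntax_valid : Prop := ∀ (code : String), Dom_rb_is_syntax_valid code → Spec_rb_is_syntax_valid code (rb_is_syntax_valid code)

-- ===== LEMMAS AND PROOFS =====

theorem pvFoldl_none (acts : List (List Char × Nat)) :
    acts.foldl (fun o p => o.bind fun s => pvStep s p) none = none := by
  induction acts with
  | nil => rfl
  | cons p ps ih => simpa using ih

-- A's triple mismatch test equals Source B's `pairs` lookup when c is a closing bracket
theorem pvMismatch (c top : Char) (h : (c == ')' || c == ']' || c == '}') = true) :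
    ((c == ')' && top != '(') || (c == ']' && top != '[') || (c == '}' && top != '{')) =
      (top != pvPairs c) := by
  simp only [Bool.or_eq_true, beq_iff_eq] at h
  rcases h with (h | h) | h <;> subst h <;> simp [pvPairs]

-- the per-line equivalence: A's interleaved scan = classify-then-fold
theorem pvLoop_eq (line : List Char) (rest : List Char) (i : Nat)
    (d e : Int) (instr : Bool) (sc : Option Char) (br : List Char) :
    rest = line.drop i →
    pvALoop line rest i d e instr sc br =
      ((((pvClassify line rest i instr sc).1.map (fun j => (line, j))).foldl
          (fun o p => o.bind fun s => pvStep s p) (some (d, e, br))).map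
        (fun s => (s.1, s.2.1, (pvClassify line rest i instr sc).2.1,
                   (pvClassify line rest i instr sc).2.2, s.2.2))) := by
  induction rest generalizing i d e instr sc br with
  | nil => intro _; simp [pvALoop, pvClassify]
  | cons c rs ih =>
    intro h
    have hrs : rs = line.drop (i+1) := by
      have := congrArg List.tail h
      simpa [List.tail_drop] using this
    have hcd : List.getD line i ' ' = c := by
      have h0 : getElem? line i = some c := by
        have := congrArg (fun l => getElem? l 0) h
        simpa using this.symm
      rw [List.getD_eq_getElem?_getD, h0]; rfl
    simp only [pvALoop, pvClassify]
    by_cases hq : ((c == '"' || c == '\'') && (i == 0 || (line.getD (i-1) ' ' != '\\'))) = true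
    · rw [if_pos hq, if_pos hq]
      cases instr with
      | false =>
        rw [if_pos (by decide : (!false) = true), if_pos (by decide : (!false) = true)]
        exact ih (i+1) d e true (some c) br hrs
      | true =>
        rw [if_neg (by decide : ¬ (!true) = true), if_neg (by decide : ¬ (!true) = true)]
        by_cases hsc : (some c == sc) = true
        · rw [if_pos hsc, if_pos hsc]
          exact ih (i+1) d e false none br hrs
        · rw [if_neg hsc, if_neg hsc]
          exact ih (i+1) d e true sc br hrs
    · rw [if_neg hq, if_neg hq]
      cases instr with
      | true =>
        rw [if_pos (by decide : true = true), if_pos (by decide : true = true)]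
        exact ih (i+1) d e true sc br hrs
      | false =>
        rw [if_neg (by decide : ¬ false = true), if_neg (by decide : ¬ false = true)]
        rcases hcl : pvClassify line rs (i+1) false sc with ⟨acts, instr', sc'⟩
        have hih : ∀ (d e : Int) (br : List Char),
            pvALoop line rs (i+1) d e false sc br =
              Option.map (fun s => (s.1, s.2.1, instr', sc', s.2.2))
                (List.foldl (fun o p => o.bind fun s => pvStep s p) (some (d, e, br))
                  (List.map (fun j => (line, j)) acts)) := by
          intro d e br
          rw [ih (i+1) d e false sc br hrs, hcl]
        simp only [List.map_cons, List.foldl_cons]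
        rw [show ((some (d, e, br)).bind fun s => pvStep s (line, i)) = pvStep (d, e, br) (line, i)
              from rfl]
        have hstep : pvStep (d, e, br) (line, i) =
            (if (c == '(' || c == '[' || c == '{') then
              some ((if PySem.Chars.startswith (List.drop i line) "def ".toList then d + 1 else d),
                (if (!PySem.Chars.startswith (List.drop i line) "def ".toList &&
                     (c == 'e' && PySem.Chars.startswith (List.drop i line) "end".toList &&
                      (decide (line.length ≤ i+3) || !PySem.Chars.isalnum (line.getD (i+3) ' '))))
                 then e + 1 else e), c :: br)
            else if (c == ')' || c == ']' || c == '}') then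
              match br with
              | [] => none
              | top :: brs =>
                if top != pvPairs c then none
                else some ((if PySem.Chars.startswith (List.drop i line) "def ".toList
                              then d + 1 else d),
                  (if (!PySem.Chars.startswith (List.drop i line) "def ".toList &&
                       (c == 'e' && PySem.Chars.startswith (List.drop i line) "end".toList &&
                        (decide (line.length ≤ i+3) || !PySem.Chars.isalnum (line.getD (i+3) ' '))))
                   then e + 1 else e), brs)
            else
              some ((if PySem.Chars.startswith (List.drop i line) "def ".toList then d + 1 else d),
                (if (!PySem.Chars.startswith (List.drop i line) "def ".toList &&
                     (c == 'e' && PySem.Chars.startswith (List.drop i line) "end".toList &&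
                      (decide (line.length ≤ i+3) || !PySem.Chars.isalnum (line.getD (i+3) ' '))))
                 then e + 1 else e), br)) := by
          simp only [pvStep, hcd]
        rw [hstep]
        by_cases hop : (c == '(' || c == '[' || c == '{') = true
        · rw [if_pos hop, if_pos hop]
          exact hih _ _ _
        · rw [if_neg hop, if_neg hop]
          by_cases hcls : (c == ')' || c == ']' || c == '}') = true
          · rw [if_pos hcls, if_pos hcls]
            rcases br with _ | ⟨top, brs⟩
            · simp [pvFoldl_none]
            · simp only [← pvMismatch c top hcls]
              by_cases hmm : ((c == ')' && top != '(') || (c == ']' && top != '[') ||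
                  (c == '}' && top != '{')) = true
              · rw [if_pos hmm, if_pos hmm]
                simp [pvFoldl_none]
              · rw [if_neg hmm, if_neg hmm]
                exact hih _ _ _
          · rw [if_neg hcls, if_neg hcls]
            exact hih _ _ _


-- the all-lines equivalence: A's outer loop = pass 1 followed by the flat fold
theorem pvLines_eq (lines : List (List Char))
    (d e : Int) (instr : Bool) (sc : Option Char) (br : List Char) :
    pvALines lines d e instr sc br =
      (((pvPass1 lines instr sc).1.foldl
          (fun o p => o.bind fun s => pvStep s p) (some (d, e, br))).map
        (fun s => (s.1, s.2.1, (pvPass1 lines instr sc).2.1,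
                   (pvPass1 lines instr sc).2.2, s.2.2))) := by
  induction lines generalizing d e instr sc br with
  | nil => simp [pvALines, pvPass1]
  | cons l ls ih =>
    simp only [pvALines, pvPass1]
    by_cases h1 : PySem.Chars.startswith (PySem.Chars.strip l) ['#'] = true
    · rw [if_pos h1, if_pos h1]
      exact ih d e instr sc br
    · rw [if_neg h1, if_neg h1]
      rcases hcl : pvClassify (PySem.Chars.strip l) (PySem.Chars.strip l) 0 instr sc
        with ⟨acts, instr', sc'⟩
      rcases hps : pvPass1 ls instr' sc' with ⟨rest, fin⟩
      rw [pvLoop_eq (PySem.Chars.strip l) (PySem.Chars.strip l) 0 d e instr sc br rfl]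
      simp only [hcl, List.foldl_append]
      rcases hf : List.foldl (fun o p => o.bind fun s => pvStep s p) (some (d, e, br))
          (List.map (fun j => (PySem.Chars.strip l, j)) acts) with _ | ⟨d', e', br'⟩
      · rw [hf]
        simp [pvFoldl_none]
      · rw [hf]
        have hi := ih d' e' instr' sc' br'
        rw [hps] at hi
        simp [hi]

-- ===== VERDICT (by name: the statement is the Claim_ definition above) =====
theorem rb_is_syntax_valid_spec : Claim_equal_rb_is_syntax_valid := by
  intro code _
  unfold Spec_rb_is_syntax_valid rb_is_syntax_valid rb_is_syntax_valid_alt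
  rw [pvLines_eq]
  rcases hps : pvPass1 (PySem.Chars.splitOn (PySem.Chars.strip code.toList) ['\n']) false none
    with ⟨acts, instr, sc⟩
  rcases hf : List.foldl (fun o p => o.bind fun s => pvStep s p) (some (0, 0, [])) acts
      with _ | ⟨dd, ee, bb⟩ <;> simp [hf]
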